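-- pv_equiv track=rewrite | github.com/anmapie/advent-of-code | 2020/day20/day20.py | build_edge_list
-- ===== SOURCE A (Python) =====
-- def build_edge_list(tile):
--     end_index = len(tile) - 1
--
--     # build columns
--     left_col = ""
--     right_col = ""
--     for row_index in range(len(tile)):
--         left_col += tile[row_index][0]
--         right_col += tile[row_index][end_index]
--
--     return [tile[0], right_col, tile[end_index], left_col]
-- ===== SOURCE B (Python) =====
-- def build_edge_list(tile):
--     # transpose once; first/last tuples of the transpose are the side columns
--     cols = list(zip(*tile))
--     end = len(tile) - 1
--     return [tile[0], ''.join(cols[end]), tile[end], ''.join(cols[0])]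
-- ===== Notes on version B (the rewrite author's own statement) =====
-- stated objective: idiomatic
-- what changed: Replaces the row-by-row loop that grows two column strings by += with a single transpose (zip(*tile)) from which the left and right columns are read off as the first and end-index tuples.
import Mathlib
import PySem

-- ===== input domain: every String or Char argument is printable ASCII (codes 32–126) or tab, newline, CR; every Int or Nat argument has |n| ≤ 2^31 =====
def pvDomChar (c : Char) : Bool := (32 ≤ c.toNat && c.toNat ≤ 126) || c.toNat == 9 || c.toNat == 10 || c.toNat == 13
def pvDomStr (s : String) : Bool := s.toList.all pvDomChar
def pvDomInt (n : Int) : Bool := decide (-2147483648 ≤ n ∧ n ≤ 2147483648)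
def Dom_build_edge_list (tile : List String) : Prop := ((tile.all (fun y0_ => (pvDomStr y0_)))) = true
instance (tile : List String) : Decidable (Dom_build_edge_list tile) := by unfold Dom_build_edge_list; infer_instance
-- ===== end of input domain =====

-- B builds the tile's transpose once (zip(*tile)) and reads the side columns off it,
-- instead of growing two column strings row by row; same cost, a different decomposition.


-- ===== PORT A =====
def build_edge_list (tile : List String) : List String :=
  let endIndex : Int := (tile.length : Int) - 1
  -- the loop grows left_col and right_col one character per row (chars kept as List Char,
  -- rendered with String.ofList; defaults are never hit under Pre_)
  let lr := (PySem.List.pyRange 0 (tile.length : Int) 1).foldl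
    (fun (lr : List Char × List Char) i =>
      let row := PySem.List.pyGetD tile i ""
      (lr.1 ++ [(PySem.Str.pyGet? row 0).getD ' '],
       lr.2 ++ [(PySem.Str.pyGet? row endIndex).getD ' ']))
    ([], [])
  [PySem.List.pyGetD tile 0 "", String.ofList lr.2,
   PySem.List.pyGetD tile endIndex "", String.ofList lr.1]

-- ===== PORT B =====
-- zip(*rows): hand-written transpose, truncating to the shortest row (exact for zip);
-- fuel = length of the first row bounds the number of tuples zip can produce
def pvZipGo : Nat → List (List Char) → List (List Char)
  | 0, _ => []
  | fuel + 1, rows =>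
    if rows.any (·.isEmpty) then []
    else rows.map (fun r => r.headD ' ') :: pvZipGo fuel (rows.map (fun r => r.tail))

def pvZipCols (rows : List (List Char)) : List (List Char) :=
  match rows with
  | [] => []
  | r :: _ => pvZipGo r.length rows

def build_edge_list_alt (tile : List String) : List String :=
  let cols := pvZipCols (tile.map String.toList)
  let e : Int := (tile.length : Int) - 1
  [PySem.List.pyGetD tile 0 "",
   String.ofList (PySem.List.pyGetD cols e []),
   PySem.List.pyGetD tile e "",
   String.ofList (PySem.List.pyGetD cols 0 [])]

-- ===== PRECONDITION & SPEC =====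
-- Pre_ excludes exactly the inputs where the Python A raises IndexError: the empty tile
-- (tile[0]) and tiles with a row shorter than len(tile) (row[end_index]); B raises there too.
def Pre_build_edge_list (tile : List String) : Prop :=
  tile ≠ [] ∧ ∀ s ∈ tile, tile.length ≤ s.toList.length
instance (tile : List String) : Decidable (Pre_build_edge_list tile) := by
  unfold Pre_build_edge_list; infer_instance
def pvWitness_build_edge_list : List String := ["ab.", "#b.", ".#a"]
def Spec_build_edge_list (tile : List String) (out : List String) : Prop := out = build_edge_list_alt tile
instance (tile : List String) (out : List String) : Decidable (Spec_build_edge_list tile out) := by unfold Spec_build_edge_list; infer_instance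

-- ===== CLAIM (what is proved, stated in full; the proofs are below) =====
def Claim_equal_build_edge_list : Prop := ∀ (tile : List String), Dom_build_edge_list tile → Pre_build_edge_list tile → Spec_build_edge_list tile (build_edge_list tile)

-- ===== LEMMAS AND PROOFS =====

theorem pvZipGo_getElem? (fuel : Nat) (rows : List (List Char)) (k : Nat)
    (hk : k < fuel) (hlen : ∀ r ∈ rows, k < r.length) :
    (pvZipGo fuel rows)[k]? = some (rows.map (fun r => r.getD k ' ')) := by
  induction fuel generalizing rows k with
  | zero => omega
  | succ m ih =>
    have hne : rows.any (·.isEmpty) = false := by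
      rw [List.any_eq_false]
      intro r hr
      have := hlen r hr
      simp [List.isEmpty_iff]
      intro h; subst h; simp at this
    rw [pvZipGo]
    simp only [hne, Bool.false_eq_true, if_false]
    cases k with
    | zero =>
      simp only [List.getElem?_cons_zero, Option.some.injEq]
      apply List.map_congr_left
      intro a _; cases a <;> rfl
    | succ k =>
      simp only [List.getElem?_cons_succ]
      rw [ih (rows.map (fun r => r.tail)) k (by omega)
        (by intro r hr; simp at hr; obtain ⟨s, hs, rfl⟩ := hr
            have := hlen s hs; simp [List.length_tail]; omega)]
      congr 1
      rw [List.map_map]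
      apply List.map_congr_left
      intro r hr
      have := hlen r hr
      cases r with
      | nil => simp at this
      | cons a t => simp

-- A's fold unrolled: the two accumulated columns are maps over the rows
theorem pv_foldA (tile : List String) (e : Int) :
    ((PySem.List.pyRange 0 (tile.length : Int) 1).foldl
      (fun (lr : List Char × List Char) i =>
        let row := PySem.List.pyGetD tile i ""
        (lr.1 ++ [(PySem.Str.pyGet? row 0).getD ' '],
         lr.2 ++ [(PySem.Str.pyGet? row e).getD ' ']))
      ([], []))
    = (tile.map (fun s => (PySem.Str.pyGet? s 0).getD ' '),
       tile.map (fun s => (PySem.Str.pyGet? s e).getD ' ')) := by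
  have key : ∀ (l : List Int) (acc : List Char × List Char),
      (l.foldl (fun (lr : List Char × List Char) i =>
        let row := PySem.List.pyGetD tile i ""
        (lr.1 ++ [(PySem.Str.pyGet? row 0).getD ' '],
         lr.2 ++ [(PySem.Str.pyGet? row e).getD ' ']))
        acc)
      = (acc.1 ++ l.map (fun i => (PySem.Str.pyGet? (PySem.List.pyGetD tile i "") 0).getD ' '),
         acc.2 ++ l.map (fun i => (PySem.Str.pyGet? (PySem.List.pyGetD tile i "") e).getD ' ')) := by
    intro l
    induction l with
    | nil => intro acc; simp
    | cons x xs ih => intro acc; rw [List.foldl_cons, ih]; simp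
  rw [key]
  have h0 : (PySem.List.pyRange 0 (tile.length : Int) 1).map
      (fun i => PySem.List.pyGetD tile i "") = tile := by
    simpa using PySem.List.map_pyGetD_pyRange_zero tile ""
  have comp : ∀ j : Int, (fun i => (PySem.Str.pyGet? (PySem.List.pyGetD tile i "") j).getD ' ')
      = (fun s => (PySem.Str.pyGet? s j).getD ' ') ∘ (fun i => PySem.List.pyGetD tile i "") :=
    fun _ => rfl
  rw [comp 0, comp e, ← List.map_map, ← List.map_map, h0]
  simp

-- string indexing with a nonnegative in-range index as List.getD on the char list
theorem pv_strGet (s : String) (k : Nat) (_h : k < s.toList.length) :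
    (PySem.Str.pyGet? s (k : Int)).getD ' ' = s.toList.getD k ' ' := by
  have : PySem.Str.pyGet? s (k : Int) = PySem.Chars.pyGet? s.toList (k : Int) := by
    simp [PySem.Str.pyGet?]
  rw [this]
  have : PySem.Chars.pyGet? s.toList (k : Int) = s.toList[k]? := by
    simp [PySem.List.pyGet?_natCast]
  rw [this, List.getD_eq_getElem?_getD]

-- ===== VERDICT (by name: the statement is the Claim_ definition above) =====
theorem build_edge_list_spec : Claim_equal_build_edge_list := by
  intro tile _ ⟨hne, hlen⟩
  unfold Spec_build_edge_list build_edge_list build_edge_list_alt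
  obtain ⟨r0, rest, rfl⟩ : ∃ r0 rest, tile = r0 :: rest := by
    cases tile with
    | nil => exact absurd rfl hne
    | cons a b => exact ⟨a, b, rfl⟩
  set tile := r0 :: rest with htile
  have hn1 : 1 ≤ tile.length := by simp [htile]
  have hecast : ((tile.length : Int) - 1) = ((tile.length - 1 : Nat) : Int) := by
    omega
  have hr0 : tile.length ≤ r0.toList.length := hlen r0 (by simp [htile])
  -- the transpose's relevant entries
  have hcols : ∀ k : Nat, k < tile.length →
      (pvZipCols (tile.map String.toList))[k]? =
        some (tile.map (fun s => s.toList.getD k ' ')) := by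
    intro k hk
    have : pvZipCols (tile.map String.toList) = pvZipGo r0.toList.length (tile.map String.toList) := by
      simp [pvZipCols, htile]
    rw [this, pvZipGo_getElem? _ _ k (by omega)
      (by intro r hr; simp at hr; obtain ⟨s, hs, rfl⟩ := hr
          have := hlen s (by simpa [htile] using hs); omega)]
    simp [List.map_map]
  simp only [pv_foldA]
  simp only [hecast]
  have hcolsD : ∀ k : Nat, k < tile.length →
      PySem.List.pyGetD (pvZipCols (tile.map String.toList)) (k : Int) [] =
        tile.map (fun s => s.toList.getD k ' ') := by
    intro k hk
    rw [PySem.List.pyGetD_natCast, List.getD_eq_getElem?_getD, hcols k hk]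
    rfl
  have hc0 : PySem.List.pyGetD (pvZipCols (tile.map String.toList)) 0 [] =
      tile.map (fun s => s.toList.getD 0 ' ') := by
    simpa using hcolsD 0 (by omega)
  have hright : tile.map (fun s => (PySem.Str.pyGet? s ((tile.length - 1 : Nat) : Int)).getD ' ')
      = tile.map (fun s => s.toList.getD (tile.length - 1) ' ') := by
    apply List.map_congr_left
    intro s hs
    exact pv_strGet s _ (by have := hlen s hs; omega)
  have hleft : tile.map (fun s => (PySem.Str.pyGet? s 0).getD ' ')
      = tile.map (fun s => s.toList.getD 0 ' ') := by
    apply List.map_congr_left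
    intro s hs
    have h1 := hlen s hs
    simpa using pv_strGet s 0 (by omega)
  rw [hcolsD (tile.length - 1) (by omega), hc0, hright, hleft]
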